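-- pv_equiv track=rewrite | github.com/need-singularity/sylvian-singularity | calc/divisor_lattice_universal.py | count_maximal_chains
-- ===== SOURCE A (Python) =====
-- import math
--
-- def factorize(n):
--     """Return prime factorization as dict {prime: exponent}."""
--     if n <= 1:
--         return {}
--     factors = {}
--     d = 2
--     while d * d <= n:
--         while n % d == 0:
--             factors[d] = factors.get(d, 0) + 1
--             n //= d
--         d += 1
--     if n > 1:
--         factors[n] = factors.get(n, 0) + 1
--     return factors
--
-- def count_maximal_chains(n):
--     """Count maximal chains from 1 to n in divisor lattice.
--     Equals multinomial(Omega(n); e1, e2, ...) where n = p1^e1 * p2^e2 * ..."""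
--     fac = factorize(n)
--     if not fac:
--         return 1
--     total = sum(fac.values())
--     result = math.factorial(total)
--     for e in fac.values():
--         result //= math.factorial(e)
--     return result
-- ===== SOURCE B (Python) =====
-- def count_maximal_chains(n):
--     """Count maximal chains from 1 to n in the divisor lattice by dynamic
--     programming over the lattice itself (no factorials): a maximal chain
--     ending at the divisor with exponent vector v extends a chain ending at
--     a vector with one coordinate decremented, so chains[v] = sum of
--     chains at the predecessors, filled in lexicographic order."""
--     exps = []
--     d = 2
--     while d * d <= n:
--         e = 0
--         while n % d == 0:
--             n //= d
--             e += 1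
--         if e:
--             exps.append(e)
--         d += 1
--     if n > 1:
--         exps.append(1)
--     table = {}
--     for v in _grid(exps):
--         if not any(v):
--             table[v] = 1
--         else:
--             table[v] = sum(table[v[:i] + (v[i] - 1,) + v[i + 1:]]
--                            for i, e in enumerate(v) if e)
--     return table[tuple(exps)]
--
-- def _grid(exps):
--     """All exponent vectors <= exps componentwise, in lexicographic order."""
--     if not exps:
--         return [()]
--     rest = _grid(exps[1:])
--     return [(i,) + v for i in range(exps[0] + 1) for v in rest]
-- ===== Notes on version B (the rewrite author's own statement) =====
-- stated objective: alternative
-- what changed: Instead of computing the multinomial coefficient from the factorization with factorials, B counts the maximal chains directly by dynamic programming over the divisor lattice: it enumerates all exponent vectors below the factorization in lexicographic order and fills a table with chains[v] = sum of chains at the vectors with one coordinate decremented.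
import Mathlib
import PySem

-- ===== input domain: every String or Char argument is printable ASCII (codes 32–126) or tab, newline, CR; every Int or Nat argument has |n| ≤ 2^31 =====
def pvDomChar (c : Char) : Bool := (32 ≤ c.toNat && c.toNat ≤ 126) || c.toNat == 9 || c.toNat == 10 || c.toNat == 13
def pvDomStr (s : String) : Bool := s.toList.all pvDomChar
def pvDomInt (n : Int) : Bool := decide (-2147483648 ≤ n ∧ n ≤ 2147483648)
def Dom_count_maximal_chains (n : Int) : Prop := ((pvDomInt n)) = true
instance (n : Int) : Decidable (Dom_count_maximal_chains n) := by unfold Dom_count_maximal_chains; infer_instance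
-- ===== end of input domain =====

-- B replaces the factorial-based multinomial formula by dynamic programming over the divisor
-- lattice itself: it fills a table chains[v] = sum of chains at the exponent vectors with one
-- coordinate decremented, over the whole grid of vectors below the factorization; objective:
-- alternative algorithm, same result, no factorials.

-- ===== PORT A =====
-- inner 'while n % d == 0' of factorize: factors[d] = factors.get(d, 0) + 1; n //= d.
-- (the '2 ≤ d ∧ 0 < n' part of the guard only makes the recursion total; both hold on every call factorize makes)
def pyInner (d n : Nat) (f : PySem.Dict Nat Nat) : PySem.Dict Nat Nat × Nat :=
  if h : 2 ≤ d ∧ 0 < n ∧ n % d = 0 then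
    pyInner d (n / d) (f.insert d (f.getD d 0 + 1))
  else (f, n)
  termination_by n
  decreasing_by exact Nat.div_lt_self h.2.1 (Nat.lt_of_lt_of_le Nat.one_lt_two h.1)

-- (needed by pyOuter's termination argument)
theorem pyInner_snd_le (d : Nat) : ∀ n, ∀ f : PySem.Dict Nat Nat, (pyInner d n f).2 ≤ n := by
  intro n
  induction n using Nat.strong_induction_on with
  | _ n ih =>
    intro f
    by_cases h : 2 ≤ d ∧ 0 < n ∧ n % d = 0
    · rw [pyInner, dif_pos h]
      exact le_trans
        (ih (n / d) (Nat.div_lt_self h.2.1 (Nat.lt_of_lt_of_le Nat.one_lt_two h.1)) _)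
        (Nat.div_le_self n d)
    · rw [pyInner, dif_neg h]

-- outer 'while d * d <= n' of factorize, d counting up from 2
def pyOuter (d n : Nat) (f : PySem.Dict Nat Nat) : PySem.Dict Nat Nat × Nat :=
  if h : 2 ≤ d ∧ d * d ≤ n then
    pyOuter (d + 1) (pyInner d n f).2 (pyInner d n f).1
  else (f, n)
  termination_by n + 2 - d
  decreasing_by
    exact Nat.lt_of_le_of_lt
      (Nat.sub_le_sub_right (Nat.add_le_add_right (pyInner_snd_le d n f) 2) (d + 1))
      (Nat.sub_lt_sub_left
        (Nat.lt_of_le_of_lt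
          (le_trans (Nat.le_mul_of_pos_left d (Nat.lt_of_lt_of_le Nat.zero_lt_two h.1)) h.2)
          (Nat.lt_add_of_pos_right Nat.zero_lt_two))
        (Nat.lt_succ_self d))

-- factorize(n): trial division building the dict {prime: exponent}
def factorizeA (n : Int) : PySem.Dict Nat Nat :=
  if n ≤ 1 then PySem.Dict.empty
  else
    let p := pyOuter 2 n.toNat PySem.Dict.empty
    if 1 < p.2 then p.1.insert p.2 (p.1.getD p.2 0 + 1) else p.1

-- count_maximal_chains: result = total!, then result //= e! for each exponent e.
-- (every intermediate value is a nonnegative int, so Python's '//' is exactly Nat division here)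
def count_maximal_chains (n : Int) : Int :=
  let fac := factorizeA n
  if fac.size = 0 then 1
  else
    let total := fac.values.sum
    Int.ofNat (fac.values.foldl (fun r e => r / Nat.factorial e) (Nat.factorial total))

-- ===== PORT B =====
-- inner 'while n % d == 0' of B: only counts the exponent e (no dict)
def altDivOut (d n e : Nat) : Nat × Nat :=
  if h : 2 ≤ d ∧ 0 < n ∧ n % d = 0 then altDivOut d (n / d) (e + 1)
  else (e, n)
  termination_by n
  decreasing_by exact Nat.div_lt_self h.2.1 (Nat.lt_of_lt_of_le Nat.one_lt_two h.1)

-- (needed by altOuter's termination argument)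
theorem altDivOut_snd_le (d : Nat) : ∀ n e : Nat, (altDivOut d n e).2 ≤ n := by
  intro n
  induction n using Nat.strong_induction_on with
  | _ n ih =>
    intro e
    by_cases h : 2 ≤ d ∧ 0 < n ∧ n % d = 0
    · rw [altDivOut, dif_pos h]
      exact le_trans
        (ih (n / d) (Nat.div_lt_self h.2.1 (Nat.lt_of_lt_of_le Nat.one_lt_two h.1)) _)
        (Nat.div_le_self n d)
    · rw [altDivOut, dif_neg h]

-- outer 'while d * d <= n' of B: append e to the exponent list when e ≠ 0
def altOuter (d n : Nat) (acc : List Nat) : List Nat × Nat :=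
  if h : 2 ≤ d ∧ d * d ≤ n then
    altOuter (d + 1) (altDivOut d n 0).2
      (if (altDivOut d n 0).1 ≠ 0 then acc ++ [(altDivOut d n 0).1] else acc)
  else (acc, n)
  termination_by n + 2 - d
  decreasing_by
    exact Nat.lt_of_le_of_lt
      (Nat.sub_le_sub_right (Nat.add_le_add_right (altDivOut_snd_le d n 0) 2) (d + 1))
      (Nat.sub_lt_sub_left
        (Nat.lt_of_le_of_lt
          (le_trans (Nat.le_mul_of_pos_left d (Nat.lt_of_lt_of_le Nat.zero_lt_two h.1)) h.2)
          (Nat.lt_add_of_pos_right Nat.zero_lt_two))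
        (Nat.lt_succ_self d))

-- _grid(exps): all exponent vectors ≤ exps, in lexicographic order
-- ('rest' computed once per level, then each i in range(exps[0]+1) is prepended to it)
def gridB : List Nat → List (List Nat)
  | [] => [[]]
  | e :: rest => (List.range (e + 1)).flatMap (fun i => (gridB rest).map (fun v => i :: v))

-- v[:i] + (v[i] - 1,) + v[i+1:]  (exponents are nonnegative python ints, represented as Nat;
-- the '- 1' is only evaluated under 'if e', where v[i] ≥ 1, so Nat subtraction is exact)
def decPy (v : List Nat) (i : Int) : List Nat :=
  PySem.List.slice v none (some i) ++ (PySem.List.pyGetD v i 0 - 1) :: PySem.List.slice v (some (i + 1)) none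

-- the loop body: table[v] = 1 if not any(v) else sum(table[...] for i, e in enumerate(v) if e)
-- (the looked-up keys are always already present — proved below — so getD _ 0 is table[...])
def cellVal (t : PySem.Dict (List Nat) Nat) (v : List Nat) : Nat :=
  if v.all (· == 0) then 1
  else (PySem.List.enumerate v).foldl (fun s p => if p.2 ≠ 0 then s + t.getD (decPy v p.1) 0 else s) 0

def count_maximal_chains_alt (n : Int) : Int :=
  -- for n ≤ 1 (incl. negatives) both the loop guard and the final 'n > 1' test are false
  -- either way, so n.toNat is exact here
  let p := altOuter 2 n.toNat []
  let exps := if 1 < p.2 then p.1 ++ [1] else p.1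
  let table := (gridB exps).foldl (fun t v => t.insert v (cellVal t v)) PySem.Dict.empty
  Int.ofNat (table.getD exps 0)

-- ===== PRECONDITION & SPEC =====
def Spec_count_maximal_chains (n : Int) (out : Int) : Prop := out = count_maximal_chains_alt n
instance (n : Int) (out : Int) : Decidable (Spec_count_maximal_chains n out) := by unfold Spec_count_maximal_chains; infer_instance

-- ===== CLAIM (what is proved, stated in full; the proofs are below) =====
def Claim_equal_count_maximal_chains : Prop := ∀ (n : Int), Dom_count_maximal_chains n → Spec_count_maximal_chains n (count_maximal_chains n)


-- ===== LEMMAS AND PROOFS =====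

-- ---- A's dict-factorization agrees with B's exponent-list factorization (loop by loop) ----

-- the exponent accumulator of altDivOut is additive
theorem altDivOut_acc (d : Nat) : ∀ n e, altDivOut d n e = (e + (altDivOut d n 0).1, (altDivOut d n 0).2) := by
  intro n
  induction n using Nat.strong_induction_on with
  | _ n ih =>
    intro e
    by_cases h : 2 ≤ d ∧ 0 < n ∧ n % d = 0
    · rw [altDivOut, dif_pos h, ih (n / d) (Nat.div_lt_self h.2.1 (by omega)) (e + 1)]
      conv_rhs => rw [altDivOut, dif_pos h, ih (n / d) (Nat.div_lt_self h.2.1 (by omega)) 1]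
      simp; omega
    · rw [altDivOut, dif_neg h]
      conv_rhs => rw [altDivOut, dif_neg h]
      simp

theorem altDivOut_pos (d n e : Nat) (h : 0 < n) : 0 < (altDivOut d n e).2 := by
  induction n, e using altDivOut.induct d with
  | case1 n e hc ih =>
    rw [altDivOut, dif_pos hc]
    exact ih (Nat.div_pos (Nat.le_of_dvd hc.2.1 (Nat.dvd_of_mod_eq_zero hc.2.2)) (by omega))
  | case2 n e hc => rw [altDivOut, dif_neg hc]; exact h

theorem altDivOut_dvd (d n e : Nat) : (altDivOut d n e).2 ∣ n := by
  induction n, e using altDivOut.induct d with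
  | case1 n e hc ih =>
    rw [altDivOut, dif_pos hc]
    exact dvd_trans ih (Nat.div_dvd_of_dvd (Nat.dvd_of_mod_eq_zero hc.2.2))
  | case2 n e hc => rw [altDivOut, dif_neg hc]

theorem altDivOut_not_dvd (d n e : Nat) (hd : 2 ≤ d) (hn : 0 < n) : ¬ d ∣ (altDivOut d n e).2 := by
  induction n, e using altDivOut.induct d with
  | case1 n e hc ih =>
    rw [altDivOut, dif_pos hc]
    exact ih (Nat.div_pos (Nat.le_of_dvd hc.2.1 (Nat.dvd_of_mod_eq_zero hc.2.2)) (by omega))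
  | case2 n e hc =>
    rw [altDivOut, dif_neg hc]
    intro hdvd
    exact hc ⟨hd, hn, Nat.mod_eq_zero_of_dvd hdvd⟩

-- A's inner loop from a dict already holding d ↦ k adds the exponent to k
theorem pyInner_ins (d : Nat) : ∀ n (f : PySem.Dict Nat Nat) (k : Nat),
    pyInner d n (f.insert d k) = (f.insert d (k + (altDivOut d n 0).1), (altDivOut d n 0).2) := by
  intro n
  induction n using Nat.strong_induction_on with
  | _ n ih =>
    intro f k
    by_cases h : 2 ≤ d ∧ 0 < n ∧ n % d = 0
    · have hA : altDivOut d n 0 = (1 + (altDivOut d (n / d) 0).1, (altDivOut d (n / d) 0).2) := by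
        rw [altDivOut, dif_pos h, altDivOut_acc d (n / d) 1]
      rw [pyInner, dif_pos h]
      rw [PySem.Dict.getD_insert_self, PySem.Dict.insert_insert_self]
      rw [ih (n / d) (Nat.div_lt_self h.2.1 (by omega)) f (k + 1), hA]
      simp only [Prod.mk.injEq]
      refine ⟨?_, trivial⟩
      congr 1
      omega
    · rw [pyInner, dif_neg h]
      conv_rhs => rw [altDivOut, dif_neg h]
      simp

-- A's inner loop on a dict not containing d = B's inner loop (exponent appended when nonzero)
theorem pyInner_eq (d n : Nat) (f : PySem.Dict Nat Nat) (hf : f.contains d = false) :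
    pyInner d n f = (if (altDivOut d n 0).1 = 0 then f else f.insert d (altDivOut d n 0).1, (altDivOut d n 0).2) := by
  by_cases h : 2 ≤ d ∧ 0 < n ∧ n % d = 0
  · have hA : altDivOut d n 0 = (1 + (altDivOut d (n / d) 0).1, (altDivOut d (n / d) 0).2) := by
      rw [altDivOut, dif_pos h, altDivOut_acc d (n / d) 1]
    rw [pyInner, dif_pos h, PySem.Dict.getD_of_not_contains f 0 hf, pyInner_ins, hA]
    simp only [Prod.mk.injEq]
    rw [if_neg (by omega)]
    refine ⟨by norm_num, trivial⟩
  · rw [pyInner, dif_neg h]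
    conv_rhs => rw [altDivOut, dif_neg h]
    simp

-- the two outer loops agree: same remaining cofactor, the dict's values are B's list,
-- and the remaining cofactor is never already a key of the dict
theorem outer_eq : ∀ (d n : Nat) (f : PySem.Dict Nat Nat) (acc : List Nat),
    2 ≤ d → 0 < n → (∀ k ∈ f.keys, 2 ≤ k ∧ k < d) → f.values = acc →
    (∀ p, 2 ≤ p → p < d → ¬ p ∣ n) →
    (pyOuter d n f).2 = (altOuter d n acc).2 ∧
    (pyOuter d n f).1.values = (altOuter d n acc).1 ∧
    (pyOuter d n f).1.contains (pyOuter d n f).2 = false := by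
  intro d n f
  induction d, n, f using pyOuter.induct with
  | case2 d n f h =>
    intro acc _ _ hkeys hvals hnd
    rw [pyOuter, dif_neg h, altOuter, dif_neg h]
    refine ⟨rfl, hvals, ?_⟩
    simp only
    rw [PySem.Dict.contains_eq_decide_mem_keys]
    simp only [decide_eq_false_iff_not]
    intro hmem
    obtain ⟨h2, hlt⟩ := hkeys n hmem
    exact hnd n h2 hlt dvd_rfl
  | case1 d n f h ih =>
    intro acc hd hn hkeys hvals hnd
    have hfree : f.contains d = false := by
      rw [PySem.Dict.contains_eq_decide_mem_keys]
      simp only [decide_eq_false_iff_not]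
      intro hmem; exact absurd (hkeys d hmem).2 (lt_irrefl d)
    have hpi := pyInner_eq d n f hfree
    set C := (altDivOut d n 0).1 with hC
    set S := (altDivOut d n 0).2 with hS
    have hSpos : 0 < S := altDivOut_pos d n 0 hn
    have hSdvd : S ∣ n := altDivOut_dvd d n 0
    have hSnd : ¬ d ∣ S := altDivOut_not_dvd d n 0 h.1 hn
    rw [pyOuter, dif_pos h, altOuter, dif_pos h]
    have hfst : (pyInner d n f).1 = if C = 0 then f else f.insert d C := by rw [hpi]
    have hsnd : (pyInner d n f).2 = S := by rw [hpi]
    rw [hfst, hsnd] at ih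
    rw [hfst, hsnd, ← hC, ← hS]
    apply ih
    · omega
    · exact hSpos
    · intro k hk
      by_cases hc : C = 0
      · rw [if_pos hc] at hk
        have := hkeys k hk; omega
      · rw [if_neg hc] at hk
        rw [PySem.Dict.mem_keys_insert] at hk
        rcases hk with rfl | hk
        · omega
        · have := hkeys k hk; omega
    · by_cases hc : C = 0
      · rw [if_pos hc, if_neg (by omega), hvals]
      · rw [if_neg hc, if_pos (by omega), ← hvals]
        have hins := PySem.Dict.items_insert_of_not_contains f C hfree
        simp only [PySem.Dict.values, hins, List.map_append, List.map_cons, List.map_nil]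
    · intro p hp2 hpd hdvd
      rcases Nat.lt_succ_iff_lt_or_eq.mp hpd with hlt | rfl
      · exact hnd p hp2 hlt (dvd_trans hdvd hSdvd)
      · exact hSnd hdvd

-- iterated Nat division is division by the product (Python's //= chain on nonnegatives)
theorem foldl_div_eq (vs : List Nat) : ∀ r, vs.foldl (fun r e => r / Nat.factorial e) r = r / (vs.map Nat.factorial).prod := by
  induction vs with
  | nil => intro r; simp
  | cons e vs ih =>
    intro r
    simp only [List.foldl_cons, List.map_cons, List.prod_cons]
    rw [ih, Nat.div_div_eq_div_mul]

theorem values_length (f : PySem.Dict Nat Nat) : f.values.length = f.size := by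
  simp [PySem.Dict.values, PySem.Dict.size]

-- A's early 'return 1' on the empty dict coincides with the general formula
theorem a_value (n : Int) :
    count_maximal_chains n = Int.ofNat ((factorizeA n).values.foldl (fun r e => r / Nat.factorial e) (Nat.factorial ((factorizeA n).values.sum))) := by
  simp only [count_maximal_chains]
  by_cases h : (factorizeA n).size = 0
  · rw [if_pos h]
    have hval : (factorizeA n).values = [] := List.length_eq_zero_iff.mp (by rw [values_length, h])
    rw [hval]
    simp
  · rw [if_neg h]

-- ---- the chain-counting recursion and its closed value ----

-- decrement coordinate i (the proof-side form of B's slice expression)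
def decR : List Nat → Nat → List Nat
  | [], _ => []
  | a :: v, 0 => (a - 1) :: v
  | a :: v, i + 1 => a :: decR v i

theorem decR_sum : ∀ (v : List Nat) (i : Nat), i < v.length → v.getD i 0 ≠ 0 → (decR v i).sum + 1 = v.sum := by
  intro v
  induction v with
  | nil => intro i hi _; simp at hi
  | cons a v ih =>
    intro i hi h0
    cases i with
    | zero =>
      simp only [List.getD_cons_zero] at h0
      simp only [decR, List.sum_cons]
      omega
    | succ i =>
      simp only [List.getD_cons_succ] at h0
      simp only [List.length_cons] at hi
      have := ih i (by omega) h0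
      simp only [decR, List.sum_cons]
      omega

-- number of maximal chains below the exponent vector v, by recursion on the lattice
def chainsN (v : List Nat) : Nat :=
  if v.all (· == 0) then 1
  else ∑ i ∈ (Finset.range v.length).attach,
    if h : v.getD i.1 0 ≠ 0 then chainsN (decR v i.1) else 0
  termination_by v.sum
  decreasing_by
    have hi : i.1 < v.length := Finset.mem_range.mp i.2
    have := decR_sum v i.1 hi h
    omega

theorem list_sum_range (n : Nat) (f : Nat → Nat) : ((List.range n).map f).sum = ∑ i ∈ Finset.range n, f i := by
  induction n with
  | zero => simp
  | succ n ih => rw [List.range_succ, List.map_append, List.sum_append, Finset.sum_range_succ, ih]; simp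

theorem chainsN_eq (v : List Nat) : chainsN v
    = if v.all (· == 0) then 1
      else ((List.range v.length).map (fun i => if v.getD i 0 ≠ 0 then chainsN (decR v i) else 0)).sum := by
  by_cases hz : v.all (· == 0)
  · rw [chainsN, if_pos hz, if_pos hz]
  · rw [chainsN, if_neg hz, if_neg hz, list_sum_range,
      ← Finset.sum_attach (Finset.range v.length) (fun i => if v.getD i 0 ≠ 0 then chainsN (decR v i) else 0)]
    apply Finset.sum_congr rfl
    intro i _
    by_cases h : v.getD i.1 0 ≠ 0
    · rw [dif_pos h, if_pos h]
    · rw [dif_neg h, if_neg h]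

theorem prodFact_pos (v : List Nat) : 0 < (v.map Nat.factorial).prod := by
  apply List.prod_pos
  intro x hx
  obtain ⟨e, _, rfl⟩ := List.mem_map.mp hx
  exact Nat.factorial_pos e

theorem prodFact_decR : ∀ (v : List Nat) (i : Nat), i < v.length → v.getD i 0 ≠ 0 →
    (v.map Nat.factorial).prod = v.getD i 0 * ((decR v i).map Nat.factorial).prod := by
  intro v
  induction v with
  | nil => intro i hi _; simp at hi
  | cons a v ih =>
    intro i hi h0
    cases i with
    | zero =>
      simp only [List.getD_cons_zero] at h0 ⊢
      obtain ⟨b, rfl⟩ : ∃ b, a = b + 1 := ⟨a - 1, by omega⟩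
      simp only [decR, List.map_cons, List.prod_cons, Nat.add_sub_cancel, Nat.factorial_succ]
      ring
    | succ i =>
      simp only [List.getD_cons_succ] at h0 ⊢
      simp only [List.length_cons] at hi
      simp only [decR, List.map_cons, List.prod_cons]
      rw [ih i (by omega) h0]
      ring

theorem sum_getD (v : List Nat) : (∑ i ∈ Finset.range v.length, v.getD i 0) = v.sum := by
  induction v with
  | nil => simp
  | cons a v ih =>
    rw [List.length_cons, Finset.sum_range_succ']
    simp only [List.getD_cons_succ, List.getD_cons_zero, List.sum_cons]
    rw [ih]
    omega

theorem sum_pos_of_not_all_zero (v : List Nat) (h : ¬ v.all (· == 0) = true) : 0 < v.sum := by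
  by_contra hs
  have hz : v.sum = 0 := by omega
  apply h
  rw [List.all_eq_true]
  intro x hx
  have hx0 := (List.sum_eq_zero_iff.mp hz) x hx
  simp [hx0]

theorem all_zero_parts (v : List Nat) (h : v.all (· == 0) = true) :
    v.sum = 0 ∧ (v.map Nat.factorial).prod = 1 := by
  rw [List.all_eq_true] at h
  constructor
  · rw [List.sum_eq_zero_iff]
    intro x hx
    simpa using h x hx
  · apply List.prod_eq_one
    intro x hx
    obtain ⟨e, he, rfl⟩ := List.mem_map.mp hx
    have : e = 0 := by simpa using h e he
    simp [this]

-- the chain count times the product of factorials is the big factorial (the multinomial identity)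
theorem chainsN_mul (v : List Nat) : chainsN v * (v.map Nat.factorial).prod = Nat.factorial v.sum := by
  generalize hs : v.sum = s
  induction s using Nat.strong_induction_on generalizing v with
  | _ s ih =>
    by_cases hz : v.all (· == 0)
    · obtain ⟨h1, h2⟩ := all_zero_parts v hz
      rw [chainsN_eq, if_pos hz, h2, ← hs, h1]
      simp [Nat.factorial]
    · rw [chainsN_eq, if_neg hz, list_sum_range]
      have hpos := sum_pos_of_not_all_zero v hz
      obtain ⟨s', hs'⟩ : ∃ s', v.sum = s' + 1 := ⟨v.sum - 1, by omega⟩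
      rw [Finset.sum_mul]
      have hterm : ∀ i ∈ Finset.range v.length,
          (if v.getD i 0 ≠ 0 then chainsN (decR v i) else 0) * (v.map Nat.factorial).prod
            = v.getD i 0 * Nat.factorial s' := by
        intro i hi
        have hi' := Finset.mem_range.mp hi
        by_cases h0 : v.getD i 0 ≠ 0
        · rw [if_pos h0, prodFact_decR v i hi' h0]
          have hsum := decR_sum v i hi' h0
          have hihv := ih (decR v i).sum (by omega) (decR v i) rfl
          calc chainsN (decR v i) * (v.getD i 0 * ((decR v i).map Nat.factorial).prod)
              = v.getD i 0 * (chainsN (decR v i) * ((decR v i).map Nat.factorial).prod) := by ring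
            _ = v.getD i 0 * Nat.factorial (decR v i).sum := by rw [hihv]
            _ = v.getD i 0 * Nat.factorial s' := by rw [show (decR v i).sum = s' from by omega]
        · rw [if_neg h0]
          have h00 : v.getD i 0 = 0 := by omega
          rw [h00, Nat.zero_mul, Nat.zero_mul]
      rw [Finset.sum_congr rfl hterm, ← Finset.sum_mul, sum_getD, ← hs, hs', Nat.factorial_succ]

-- multinomial as a factorial ratio = the chain count
theorem ratio_eq (v : List Nat) :
    Nat.factorial v.sum / (v.map Nat.factorial).prod = chainsN v :=
  Nat.div_eq_of_eq_mul_left (prodFact_pos v) (chainsN_mul v).symm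

-- ---- the grid: all vectors ≤ exps, in lexicographic = increasing mixed-radix-rank order ----

def sizeG : List Nat → Nat
  | [] => 1
  | e :: es => (e + 1) * sizeG es

def rankG : List Nat → List Nat → Nat
  | _, [] => 0
  | [], _ :: _ => 0
  | _ :: es, a :: v => a * sizeG es + rankG es v

theorem sizeG_pos (es : List Nat) : 0 < sizeG es := by
  induction es with
  | nil => simp [sizeG]
  | cons e es ih =>
    simp only [sizeG]
    exact Nat.mul_pos (by omega) ih

theorem flatMap_blocks (S : Nat) : ∀ k : Nat,
    (List.range k).flatMap (fun i => (List.range S).map (fun r => i * S + r)) = List.range (k * S) := by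
  intro k
  induction k with
  | zero => simp
  | succ k ih =>
    rw [List.range_succ, List.flatMap_append, ih,
      show (k + 1) * S = k * S + S from by ring, List.range_add]
    simp only [List.flatMap_cons, List.flatMap_nil, List.append_nil]

theorem map_rank_grid : ∀ es : List Nat, (gridB es).map (rankG es) = List.range (sizeG es) := by
  intro es
  induction es with
  | nil => simp [gridB, rankG, sizeG, List.range_one]
  | cons e es ih =>
    have hblock : (fun i => ((gridB es).map (fun v => i :: v)).map (rankG (e :: es)))
        = fun i => (List.range (sizeG es)).map (fun r => i * sizeG es + r) := by
      funext i
      rw [List.map_map, ← ih, List.map_map]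
      apply List.map_congr_left
      intro v _
      simp [rankG, Function.comp]
    show ((List.range (e + 1)).flatMap (fun i => (gridB es).map (fun v => i :: v))).map (rankG (e :: es)) = _
    rw [List.map_flatMap]
    simp only [hblock]
    rw [flatMap_blocks (sizeG es) (e + 1)]
    rfl

theorem pairwise_rank_grid (es : List Nat) :
    (gridB es).Pairwise (fun u w => rankG es u < rankG es w) := by
  have h : ((gridB es).map (rankG es)).Pairwise (· < ·) := by
    rw [map_rank_grid]
    exact List.pairwise_lt_range
  exact List.pairwise_map.mp h

theorem mem_gridB (es : List Nat) : ∀ v, v ∈ gridB es ↔ List.Forall₂ (· ≤ ·) v es := by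
  induction es with
  | nil => intro v; simp [gridB, List.forall₂_nil_right_iff]
  | cons e es ih =>
    intro v
    rw [List.forall₂_cons_right_iff]
    show v ∈ (List.range (e + 1)).flatMap (fun i => (gridB es).map (fun w => i :: w)) ↔ _
    simp only [List.mem_flatMap, List.mem_map, List.mem_range]
    constructor
    · rintro ⟨i, hi, w, hw, rfl⟩
      exact ⟨i, w, by omega, (ih w).mp hw, rfl⟩
    · rintro ⟨a, l', hab, hl, rfl⟩
      exact ⟨a, by omega, l', (ih l').mpr hl, rfl⟩

theorem forall₂_decR {v es : List Nat} (h : List.Forall₂ (· ≤ ·) v es) :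
    ∀ i, List.Forall₂ (· ≤ ·) (decR v i) es := by
  induction h with
  | nil => intro i; simp only [decR]; exact List.Forall₂.nil
  | @cons a b l1 l2 hab ht ih =>
    intro i
    cases i with
    | zero =>
      simp only [decR]
      exact List.Forall₂.cons (by omega) ht
    | succ i =>
      simp only [decR]
      exact List.Forall₂.cons hab (ih i)

theorem rank_decR_lt : ∀ (es v : List Nat) (i : Nat), v.length = es.length → i < v.length →
    v.getD i 0 ≠ 0 → rankG es (decR v i) < rankG es v := by
  intro es
  induction es with
  | nil =>
    intro v i hlen hi _
    rw [List.length_nil] at hlen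
    omega
  | cons e es ih =>
    intro v i hlen hi h0
    cases v with
    | nil => simp at hi
    | cons a v =>
      cases i with
      | zero =>
        simp only [List.getD_cons_zero] at h0
        simp only [decR, rankG]
        obtain ⟨b, rfl⟩ : ∃ b, a = b + 1 := ⟨a - 1, by omega⟩
        have hS := sizeG_pos es
        simp only [Nat.add_sub_cancel, Nat.succ_mul]
        omega
      | succ i =>
        simp only [List.getD_cons_succ] at h0
        simp only [List.length_cons] at hi hlen
        simp only [decR, rankG]
        have := ih v i (by omega) (by omega) h0
        omega

-- ---- the table fold computes chainsN on every grid member ----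

theorem foldl_if_add {B : Type} (c : B → Prop) [DecidablePred c] (g : B → Nat) :
    ∀ (l : List B) (a : Nat),
      l.foldl (fun s p => if c p then s + g p else s) a = a + (l.map (fun p => if c p then g p else 0)).sum := by
  intro l
  induction l with
  | nil => intro a; simp
  | cons x l ih =>
    intro a
    simp only [List.foldl_cons, List.map_cons, List.sum_cons]
    by_cases h : c x
    · rw [if_pos h, if_pos h, ih]; omega
    · rw [if_neg h, if_neg h, ih]; omega

theorem decR_eq : ∀ (v : List Nat) (k : Nat), k < v.length →
    decR v k = v.take k ++ (v.getD k 0 - 1) :: v.drop (k + 1) := by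
  intro v
  induction v with
  | nil => intro k hk; simp at hk
  | cons a v ih =>
    intro k hk
    cases k with
    | zero => simp [decR]
    | succ k =>
      simp only [List.length_cons] at hk
      simp only [decR, List.getD_cons_succ, List.take_succ_cons, List.drop_succ_cons, List.cons_append]
      rw [ih k (by omega)]

theorem decPy_eq (v : List Nat) (k : Nat) (hk : k < v.length) : decPy v (k : Int) = decR v k := by
  unfold decPy
  rw [PySem.List.slice_to_natCast, PySem.List.pyGetD_natCast,
    show ((k : Int) + 1) = ((k + 1 : Nat) : Int) from by push_cast; ring,
    PySem.List.slice_from_natCast, decR_eq v k hk]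

theorem cellVal_eq (t : PySem.Dict (List Nat) Nat) (v : List Nat) :
    cellVal t v = if v.all (· == 0) then 1
      else ((List.range v.length).map (fun i => if v.getD i 0 ≠ 0 then t.getD (decR v i) 0 else 0)).sum := by
  unfold cellVal
  by_cases hz : v.all (· == 0)
  · rw [if_pos hz, if_pos hz]
  · rw [if_neg hz, if_neg hz]
    rw [foldl_if_add (fun p : Int × Nat => p.2 ≠ 0) (fun p => t.getD (decPy v p.1) 0), Nat.zero_add]
    rw [PySem.List.enumerate_eq_map_pyRange v 0,
      show PySem.List.len v = ((v.length : Nat) : Int) from rfl,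
      PySem.List.pyRange_zero_nat, List.map_map, List.map_map]
    apply congrArg List.sum
    apply List.map_congr_left
    intro k hk
    have hk' : k < v.length := List.mem_range.mp hk
    simp only [Function.comp]
    rw [PySem.List.pyGetD_natCast, decPy_eq v k hk']

theorem buildT_getD (es : List Nat) : ∀ L : List (List Nat),
    (∀ u ∈ L, List.Forall₂ (· ≤ ·) u es) →
    L.Pairwise (fun u w => rankG es u < rankG es w) →
    (∀ u ∈ L, ∀ i, i < u.length → u.getD i 0 ≠ 0 → decR u i ∈ L) →
    ∀ w ∈ L, (L.foldl (fun t v => t.insert v (cellVal t v)) PySem.Dict.empty).getD w 0 = chainsN w := by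
  intro L
  induction L using List.reverseRecOn with
  | nil => intro _ _ _ w hw; simp at hw
  | append_singleton M v ih =>
    intro hg hp hc w hw
    rw [List.pairwise_append] at hp
    obtain ⟨hpM, -, hMv⟩ := hp
    have hvlen : v.length = es.length := (hg v (by simp)).length_eq
    have hrankv : ∀ u ∈ M, rankG es u < rankG es v := fun u hu => hMv u hu v (by simp)
    have hulen : ∀ u ∈ M, u.length = es.length :=
      fun u hu => (hg u (List.mem_append_left _ hu)).length_eq
    have hcM : ∀ u ∈ M, ∀ i, i < u.length → u.getD i 0 ≠ 0 → decR u i ∈ M := by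
      intro u hu i hi h0
      have hin := hc u (List.mem_append_left _ hu) i hi h0
      rcases List.mem_append.mp hin with h | h
      · exact h
      · exfalso
        have hdv : decR u i = v := by simpa using h
        have h1 : rankG es (decR u i) < rankG es u := rank_decR_lt es u i (hulen u hu) hi h0
        have h2 := hrankv u hu
        rw [hdv] at h1
        omega
    have ihM := ih (fun u hu => hg u (List.mem_append_left _ hu)) hpM hcM
    rw [List.foldl_append, List.foldl_cons, List.foldl_nil]
    rcases List.mem_append.mp hw with hwM | hwv
    · have hne : w ≠ v := by
        intro he
        have := hrankv w hwM
        rw [he] at this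
        omega
      rw [PySem.Dict.getD_insert_of_ne _ _ _ hne]
      exact ihM w hwM
    · obtain rfl : w = v := by simpa using hwv
      rw [PySem.Dict.getD_insert_self, cellVal_eq, chainsN_eq]
      by_cases hz : w.all (· == 0)
      · rw [if_pos hz, if_pos hz]
      · rw [if_neg hz, if_neg hz]
        refine congrArg List.sum (List.map_congr_left ?_)
        intro i hi
        have hi' : i < w.length := List.mem_range.mp hi
        by_cases h0 : w.getD i 0 ≠ 0
        · rw [if_pos h0, if_pos h0]
          have hmem := hc w (by simp) i hi' h0
          have hnev : decR w i ≠ w := by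
            have := rank_decR_lt es w i hvlen hi' h0
            intro he
            rw [he] at this
            omega
          have hmemM : decR w i ∈ M := by
            rcases List.mem_append.mp hmem with h | h
            · exact h
            · exact absurd (by simpa using h) hnev
          exact ihM (decR w i) hmemM
        · rw [if_neg h0, if_neg h0]

-- ---- assembling the two ports ----

-- A's dict values are exactly B's exponent list
theorem vals_eq (n : Int) :
    (factorizeA n).values
      = (if 1 < (altOuter 2 n.toNat []).2 then (altOuter 2 n.toNat []).1 ++ [1]
         else (altOuter 2 n.toNat []).1) := by
  by_cases hn : n ≤ 1
  · have hguard : ¬ (2 ≤ 2 ∧ 2 * 2 ≤ n.toNat) := by omega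
    rw [altOuter, dif_neg hguard]
    rw [if_neg (show ¬ (1 < n.toNat) by omega)]
    simp [factorizeA, if_pos hn, PySem.Dict.values, PySem.Dict.empty]
  · obtain ⟨hm, hv, hcont⟩ := outer_eq 2 n.toNat PySem.Dict.empty [] (by omega) (by omega)
      (by intro k hk; simp [PySem.Dict.keys, PySem.Dict.empty] at hk)
      (rfl)
      (by intro p hp hlt; omega)
    simp only [factorizeA, if_neg hn]
    rw [← hm]
    by_cases hm2 : 1 < (pyOuter 2 n.toNat PySem.Dict.empty).2
    · rw [if_pos hm2, if_pos hm2]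
      rw [PySem.Dict.getD_of_not_contains _ 0 hcont]
      simp only [PySem.Dict.values, PySem.Dict.items_insert_of_not_contains _ _ hcont,
        List.map_append, List.map_cons, List.map_nil]
      rw [← hv]
      rfl
    · rw [if_neg hm2, if_neg hm2, hv]

theorem main_eq (n : Int) : count_maximal_chains n = count_maximal_chains_alt n := by
  rw [a_value n, foldl_div_eq, ratio_eq, vals_eq n]
  set E := (if 1 < (altOuter 2 n.toNat []).2 then (altOuter 2 n.toNat []).1 ++ [1]
    else (altOuter 2 n.toNat []).1) with hE
  have hB : count_maximal_chains_alt n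
      = Int.ofNat (((gridB E).foldl (fun t v => t.insert v (cellVal t v)) PySem.Dict.empty).getD E 0) := rfl
  rw [hB]
  have hself : E ∈ gridB E := (mem_gridB E E).mpr (List.forall₂_same.mpr (fun x _ => le_refl x))
  rw [buildT_getD E (gridB E)
    (fun u hu => (mem_gridB E u).mp hu)
    (pairwise_rank_grid E)
    (fun u hu i hi h0 => (mem_gridB E (decR u i)).mpr (forall₂_decR ((mem_gridB E u).mp hu) i))
    E hself]

-- ===== VERDICT (by name: the statement is the Claim_ definition above) =====
theorem count_maximal_chains_spec : Claim_equal_count_maximal_chains := by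
  intro n _
  unfold Spec_count_maximal_chains
  exact main_eq n
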